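-- pv_equiv track=rewrite | github.com/amirhoseinMhmd/impossible_translation | utils/parsing.py | _build_token_mapping
-- ===== SOURCE A (Python) =====
-- SPECIAL_TOKENS = {"R", "S", "P"}
--
-- def _build_token_mapping(actual_tokens, perturbed_tokens):
--     """
--     Builds a mapping from original token position to perturbed token position.
--     Matches greedily left-to-right by token text, ignoring special tokens.
--     Returns dict: {original_idx: perturbed_idx}
--     """
--     clean_perturbed = [
--         (i, t) for i, t in enumerate(perturbed_tokens)
--         if t not in SPECIAL_TOKENS
--     ]
--     used = set()
--     mapping = {}
--     for orig_idx, orig_tok in enumerate(actual_tokens):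
--         for pert_idx, pert_tok in clean_perturbed:
--             if pert_tok == orig_tok and pert_idx not in used:
--                 mapping[orig_idx] = pert_idx
--                 used.add(pert_idx)
--                 break
--     return mapping
-- ===== SOURCE B (Python) =====
-- SPECIAL_TOKENS = {"R", "S", "P"}
--
-- def _build_token_mapping(actual_tokens, perturbed_tokens):
--     # One pass over perturbed_tokens builds a FIFO queue of positions per token
--     # text; each actual token then pops its next match in O(1) (lists reversed
--     # once so the pop comes from the end).
--     queues = {}
--     for i, t in enumerate(perturbed_tokens):
--         if t not in SPECIAL_TOKENS:
--             queues.setdefault(t, []).append(i)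
--     for q in queues.values():
--         q.reverse()
--     mapping = {}
--     for j, tok in enumerate(actual_tokens):
--         q = queues.get(tok)
--         if q:
--             mapping[j] = q.pop()
--     return mapping
-- ===== Notes on version B (the rewrite author's own statement) =====
-- stated objective: faster
-- what changed: Replaces the inner left-to-right rescan of the perturbed list per actual token with a one-pass index: a dict from token text to the queue of its unused perturbed positions, popped in O(1) per actual token.
import Mathlib
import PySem

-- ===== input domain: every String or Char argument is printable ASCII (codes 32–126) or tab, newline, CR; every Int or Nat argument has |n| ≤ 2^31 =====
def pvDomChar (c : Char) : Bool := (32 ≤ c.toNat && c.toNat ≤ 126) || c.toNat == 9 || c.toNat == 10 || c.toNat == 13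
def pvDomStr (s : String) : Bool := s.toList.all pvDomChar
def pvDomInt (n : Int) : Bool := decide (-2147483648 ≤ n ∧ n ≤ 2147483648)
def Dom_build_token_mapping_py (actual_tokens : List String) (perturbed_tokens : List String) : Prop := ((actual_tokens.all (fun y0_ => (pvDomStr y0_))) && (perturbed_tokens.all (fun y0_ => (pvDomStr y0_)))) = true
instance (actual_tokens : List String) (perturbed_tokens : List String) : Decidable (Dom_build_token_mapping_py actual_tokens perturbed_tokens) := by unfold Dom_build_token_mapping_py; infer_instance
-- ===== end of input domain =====

-- B replaces A's per-token rescan of the perturbed list with a dict from token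
-- text to the FIFO queue of its unused positions (objective: faster).

def SPECIAL_TOKENS : PySem.Set String := PySem.Set.ofList ["R", "S", "P"]

-- ===== PORT A =====
-- inner 'for … if … break' loop of A: first clean perturbed pair matching the
-- token text whose index is not yet used
def findMatchA : List (Int × String) → PySem.Set Int → String → Option Int
  | [], _, _ => none
  | p :: rest, used, tok =>
    if p.2 == tok && !(PySem.Set.contains used p.1) then some p.1
    else findMatchA rest used tok

def stepA (clean : List (Int × String)) (st : PySem.Set Int × PySem.Dict Int Int)
    (p : Int × String) : PySem.Set Int × PySem.Dict Int Int :=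
  match findMatchA clean st.1 p.2 with
  | none => st
  | some i => (PySem.Set.add st.1 i, PySem.Dict.insert st.2 p.1 i)

def build_token_mapping_py (actual_tokens : List String) (perturbed_tokens : List String) : List (Int × Int) :=
  let clean := (PySem.List.enumerate perturbed_tokens 0).filter
    (fun p => !(PySem.Set.contains SPECIAL_TOKENS p.2))
  let st := (PySem.List.enumerate actual_tokens 0).foldl (stepA clean)
    (PySem.Set.empty, PySem.Dict.empty)
  PySem.Dict.items st.2

-- ===== PORT B =====
-- queues.setdefault(t, []).append(i) for non-special tokens
def buildQueuesB (perturbed_tokens : List String) : PySem.Dict String (List Int) :=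
  (PySem.List.enumerate perturbed_tokens 0).foldl
    (fun d p => if PySem.Set.contains SPECIAL_TOKENS p.2 then d
                else PySem.Dict.modify d p.2 [] (· ++ [p.1]))
    PySem.Dict.empty

-- for q in queues.values(): q.reverse()
def reverseValuesB (d : PySem.Dict String (List Int)) : PySem.Dict String (List Int) :=
  PySem.Dict.mk ((PySem.Dict.items d).map (fun p => (p.1, p.2.reverse)))

-- q = queues.get(tok); if q: mapping[j] = q.pop()
def stepB (st : PySem.Dict String (List Int) × PySem.Dict Int Int)
    (p : Int × String) : PySem.Dict String (List Int) × PySem.Dict Int Int :=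
  let q := PySem.Dict.getD st.1 p.2 []
  match q.getLast? with
  | none => st
  | some v => (PySem.Dict.insert st.1 p.2 q.dropLast, PySem.Dict.insert st.2 p.1 v)

def build_token_mapping_py_alt (actual_tokens : List String) (perturbed_tokens : List String) : List (Int × Int) :=
  let st := (PySem.List.enumerate actual_tokens 0).foldl stepB
    (reverseValuesB (buildQueuesB perturbed_tokens), PySem.Dict.empty)
  PySem.Dict.items st.2

-- ===== PRECONDITION & SPEC =====
def Spec_build_token_mapping_py (actual_tokens : List String) (perturbed_tokens : List String) (out : List (Int × Int)) : Prop := out = build_token_mapping_py_alt actual_tokens perturbed_tokens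
instance (actual_tokens : List String) (perturbed_tokens : List String) (out : List (Int × Int)) : Decidable (Spec_build_token_mapping_py actual_tokens perturbed_tokens out) := by unfold Spec_build_token_mapping_py; infer_instance

-- ===== CLAIM (what is proved, stated in full; the proofs are below) =====
def Claim_equal_build_token_mapping_py : Prop := ∀ (actual_tokens : List String) (perturbed_tokens : List String), Dom_build_token_mapping_py actual_tokens perturbed_tokens → Spec_build_token_mapping_py actual_tokens perturbed_tokens (build_token_mapping_py actual_tokens perturbed_tokens)

-- ===== LEMMAS AND PROOFS =====

-- the indices of the clean perturbed pairs of text t not yet used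
def remIdx (clean : List (Int × String)) (used : PySem.Set Int) (t : String) : List Int :=
  (clean.filter (fun p => p.2 == t && !(PySem.Set.contains used p.1))).map (·.1)

theorem findMatchA_eq (clean : List (Int × String)) (used : PySem.Set Int) (tok : String) :
    findMatchA clean used tok = (remIdx clean used tok).head? := by
  induction clean with
  | nil => rfl
  | cons p rest ih =>
    rw [findMatchA, remIdx, List.filter_cons]
    by_cases h : (p.2 == tok && !(PySem.Set.contains used p.1)) = true
    · rw [if_pos h, if_pos h]; rfl
    · rw [if_neg h, if_neg h]; exact ih

theorem contains_add_eq {α : Type} [BEq α] [LawfulBEq α] (s : PySem.Set α) (i x : α) :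
    PySem.Set.contains (PySem.Set.add s i) x = (PySem.Set.contains s x || x == i) := by
  simp only [PySem.Set.contains]
  rw [Bool.eq_iff_iff]
  simp only [Bool.or_eq_true, List.contains_iff_mem, beq_iff_eq]
  exact PySem.Set.mem_add s i x

-- adding i to used splits the remaining filter into the old one minus index i
theorem remIdx_add_split (clean : List (Int × String)) (used : PySem.Set Int) (t : String) (i : Int) :
    remIdx clean (PySem.Set.add used i) t
      = ((clean.filter (fun p => p.2 == t && !(PySem.Set.contains used p.1))).filter
          (fun p => !(p.1 == i))).map (·.1) := by
  rw [remIdx, List.filter_filter]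
  congr 1
  apply List.filter_congr
  intro p _
  rw [contains_add_eq]
  cases h1 : (p.2 == t) <;> cases h2 : PySem.Set.contains used p.1 <;> cases h3 : (p.1 == i) <;> rfl

theorem remIdx_cons_elim (clean : List (Int × String)) (used : PySem.Set Int) (t : String)
    (i : Int) (is : List Int) (h : remIdx clean used t = i :: is) :
    ∃ q L', clean.filter (fun p => p.2 == t && !(PySem.Set.contains used p.1)) = q :: L'
      ∧ q.1 = i ∧ L'.map (·.1) = is := by
  rw [remIdx] at h
  cases hL : clean.filter (fun p => p.2 == t && !(PySem.Set.contains used p.1)) with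
  | nil => rw [hL] at h; simp at h
  | cons q L' =>
    rw [hL] at h
    simp only [List.map_cons, List.cons.injEq] at h
    exact ⟨q, L', rfl, h.1, h.2⟩

theorem remIdx_add_self (clean : List (Int × String)) (used : PySem.Set Int) (tok : String)
    (hnd : (clean.map (·.1)).Nodup) (i : Int) (is : List Int)
    (h : remIdx clean used tok = i :: is) :
    remIdx clean (PySem.Set.add used i) tok = is := by
  have hsplit := remIdx_add_split clean used tok i
  rw [hsplit]
  obtain ⟨q, L', hL, hq1, hL'⟩ := remIdx_cons_elim clean used tok i is h
  rw [hL, List.filter_cons, if_neg (by simp [hq1])]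
  have hkeep : ∀ p ∈ L', (!(p.1 == i)) = true := by
    intro p hp
    have hnd2 : ((List.filter (fun p => p.2 == tok && !(PySem.Set.contains used p.1)) clean).map (·.1)).Nodup :=
      (List.filter_sublist.map _).nodup hnd
    rw [hL] at hnd2
    simp only [List.map_cons, hq1] at hnd2
    have hmem : p.1 ∈ L'.map (·.1) := List.mem_map_of_mem hp
    have hne : p.1 ≠ i := by
      rintro rfl
      exact (List.nodup_cons.mp hnd2).1 hmem
    simpa using hne
  rw [List.filter_eq_self.mpr hkeep, hL']

theorem remIdx_add_ne (clean : List (Int × String)) (used : PySem.Set Int) (tok t : String)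
    (hnd : (clean.map (·.1)).Nodup) (i : Int) (is : List Int)
    (h : remIdx clean used tok = i :: is) (hne : t ≠ tok) :
    remIdx clean (PySem.Set.add used i) t = remIdx clean used t := by
  rw [remIdx_add_split clean used t i]
  obtain ⟨q, L', hL, hq1, hL'⟩ := remIdx_cons_elim clean used tok i is h
  have hqmem : q ∈ clean := List.mem_of_mem_filter (by rw [hL]; exact List.mem_cons_self)
  have hqtok : q.2 = tok := by
    have hqf := List.of_mem_filter (p := fun p : Int × String => p.2 == tok && !(PySem.Set.contains used p.1))
      (by rw [hL]; exact List.mem_cons_self)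
    simp only [Bool.and_eq_true, beq_iff_eq] at hqf
    exact hqf.1
  unfold remIdx
  congr 1
  apply List.filter_eq_self.mpr
  intro p hp
  have hpmem : p ∈ clean := List.mem_of_mem_filter hp
  have hpt : p.2 = t := by
    have hpf := List.of_mem_filter (p := fun p : Int × String => p.2 == t && !(PySem.Set.contains used p.1)) hp
    simp only [Bool.and_eq_true, beq_iff_eq] at hpf
    exact hpf.1
  have hne2 : p.1 ≠ i := by
    rintro hpi
    have hpq : p = q := List.inj_on_of_nodup_map hnd hpmem hqmem (by rw [hpi, hq1])
    exact hne (by rw [← hpt, hpq, hqtok])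
  simpa using hne2

theorem loop_eq (clean : List (Int × String)) (hnd : (clean.map (·.1)).Nodup)
    (acts : List String) (j : Int) (used : PySem.Set Int)
    (d : PySem.Dict String (List Int)) (mp : PySem.Dict Int Int)
    (hinv : ∀ t, PySem.Dict.getD d t [] = (remIdx clean used t).reverse) :
    ((PySem.List.enumerate acts j).foldl (stepA clean) (used, mp)).2
      = ((PySem.List.enumerate acts j).foldl stepB (d, mp)).2 := by
  induction acts generalizing j used d mp with
  | nil => rfl
  | cons a rest ih =>
    simp only [PySem.List.enumerate_cons, List.foldl_cons]
    have hq : PySem.Dict.getD d a [] = (remIdx clean used a).reverse := hinv a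
    cases hrem : remIdx clean used a with
    | nil =>
      have hA : stepA clean (used, mp) (j, a) = (used, mp) := by
        simp [stepA, findMatchA_eq, hrem]
      have hB : stepB (d, mp) (j, a) = (d, mp) := by
        simp [stepB, hq, hrem]
      rw [hA, hB]; exact ih (j + 1) used d mp hinv
    | cons i is =>
      have hA : stepA clean (used, mp) (j, a)
          = (PySem.Set.add used i, PySem.Dict.insert mp j i) := by
        simp [stepA, findMatchA_eq, hrem]
      have hB : stepB (d, mp) (j, a)
          = (PySem.Dict.insert d a is.reverse, PySem.Dict.insert mp j i) := by
        simp [stepB, hq, hrem, List.getLast?_reverse]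
      rw [hA, hB]
      refine ih (j + 1) _ _ _ ?_
      intro t
      by_cases ht : t = a
      · subst ht
        rw [PySem.Dict.getD_insert_self, remIdx_add_self clean used t hnd i is hrem]
      · rw [PySem.Dict.getD_insert_of_ne _ _ _ ht,
          remIdx_add_ne clean used a t hnd i is hrem ht, hinv t]

theorem reverseValuesB_getD (d : PySem.Dict String (List Int)) (t : String) :
    PySem.Dict.getD (reverseValuesB d) t [] = (PySem.Dict.getD d t []).reverse := by
  have key : ∀ (l : List (String × List Int)),
      (PySem.Dict.mk (l.map (fun p => (p.1, p.2.reverse)))).get? t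
        = ((PySem.Dict.mk l).get? t).map List.reverse := by
    intro l
    induction l with
    | nil => rfl
    | cons p rest ih =>
      rw [List.map_cons, PySem.Dict.get?_mk_cons, PySem.Dict.get?_mk_cons]
      by_cases h : (p.1 == t) = true
      · rw [if_pos h, if_pos h]; rfl
      · rw [if_neg h, if_neg h]; exact ih
  have hd : PySem.Dict.mk (PySem.Dict.items d) = d := rfl
  rw [reverseValuesB, PySem.Dict.getD, PySem.Dict.getD, key, hd]
  cases d.get? t <;> rfl

theorem buildQueuesB_getD (perturbed_tokens : List String) (t : String) :
    PySem.Dict.getD (buildQueuesB perturbed_tokens) t []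
      = remIdx ((PySem.List.enumerate perturbed_tokens 0).filter
          (fun p => !(PySem.Set.contains SPECIAL_TOKENS p.2))) PySem.Set.empty t := by
  have key : ∀ (l : List (Int × String)) (d : PySem.Dict String (List Int)),
      PySem.Dict.getD (l.foldl (fun d p => if PySem.Set.contains SPECIAL_TOKENS p.2 then d
          else PySem.Dict.modify d p.2 [] (· ++ [p.1])) d) t []
        = PySem.Dict.getD d t []
          ++ (l.filter (fun p => !(PySem.Set.contains SPECIAL_TOKENS p.2) && p.2 == t)).map (·.1) := by
    intro l
    induction l with
    | nil => intro d; simp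
    | cons p rest ih =>
      intro d
      rw [List.foldl_cons, List.filter_cons]
      by_cases hs : p.2 ∈ SPECIAL_TOKENS
      · rw [if_pos (by simp [PySem.Set.contains, hs]), if_neg (by simp [PySem.Set.contains, hs]), ih]
      · rw [if_neg (by simp [PySem.Set.contains, hs])]
        by_cases ht : p.2 = t
        · rw [if_pos (by simp [PySem.Set.contains, ht, ht ▸ hs]), ih, PySem.Dict.getD_modify,
            if_pos ht.symm, ht]
          simp
        · rw [if_neg (by simp [PySem.Set.contains, hs, ht]), ih, PySem.Dict.getD_modify,
            if_neg (fun h => ht h.symm)]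
  rw [buildQueuesB, key, remIdx, List.filter_filter]
  have hemp : ∀ x : Int, PySem.Set.contains PySem.Set.empty x = false := by
    intro x; rfl
  simp only [hemp, Bool.not_false, Bool.and_true, PySem.Dict.getD_empty, List.nil_append]
  congr 1
  apply List.filter_congr
  intro p _
  cases h1 : (p.2 == t) <;> cases h2 : PySem.Set.contains SPECIAL_TOKENS p.2 <;> rfl

theorem clean_nodup (perturbed_tokens : List String) :
    (((PySem.List.enumerate perturbed_tokens 0).filter
        (fun p => !(PySem.Set.contains SPECIAL_TOKENS p.2))).map (·.1)).Nodup := by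
  have hsub : (((PySem.List.enumerate perturbed_tokens 0).filter
      (fun p => !(PySem.Set.contains SPECIAL_TOKENS p.2))).map (·.1)).Sublist
      ((PySem.List.enumerate perturbed_tokens 0).map (·.1)) :=
    List.filter_sublist.map _
  refine hsub.nodup ?_
  rw [PySem.List.map_fst_enumerate]
  exact PySem.List.nodup_pyRange_one _ _

-- ===== VERDICT (by name: the statement is the Claim_ definition above) =====
theorem build_token_mapping_py_spec : Claim_equal_build_token_mapping_py := by
  intro actual_tokens perturbed_tokens _
  unfold Spec_build_token_mapping_py build_token_mapping_py build_token_mapping_py_alt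
  exact congrArg PySem.Dict.items
    (loop_eq _ (clean_nodup perturbed_tokens) actual_tokens 0 PySem.Set.empty _ _
      (fun t => by rw [reverseValuesB_getD, buildQueuesB_getD]))
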